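-- pv_equiv track=rewrite | github.com/AccLoo0311/mit6.0001-notes-pset | my_pset_code/ps4/ps4c.py | build_transpose_dict
-- ===== SOURCE A (Python) =====
-- VOWELS_LOWER = 'aeiou'
--
-- VOWELS_UPPER = 'AEIOU'
--
-- CONSONANTS_LOWER = 'bcdfghjklmnpqrstvwxyz'
--
-- CONSONANTS_UPPER = 'BCDFGHJKLMNPQRSTVWXYZ'
--
-- def build_transpose_dict(vowels_permutation):
--     '''
--     vowels_permutation (string): a string containing a permutation of vowels (a, e, i, o, u)
--
--     Creates a dictionary that can be used to apply a cipher to a letter.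
--     The dictionary maps every uppercase and lowercase letter to an
--     uppercase and lowercase letter, respectively. Vowels are shuffled
--     according to vowels_permutation. The first letter in vowels_permutation
--     corresponds to a, the second to e, and so on in the order a, e, i, o, u.
--     The consonants remain the same. The dictionary should have 52
--     keys of all the uppercase letters and all the lowercase letters.
--
--     Example: When input "eaiuo":
--     Mapping is a->e, e->a, i->i, o->u, u->o
--     and "Hello World!" maps to "Hallu Wurld!"
--
--     Returns: a dictionary mapping a letter (string) to
--              another letter (string).
--     '''
--     #vowels_permutation 字符串类型，元音对应的转换方式
--     #返回一个字典，包含52个关键字，辅音对应不变，元音转换，大小写的转换一致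
--     #字典的关键字和取值都是string类型
--     num_1=0
--     num_2=0
--     vowels_permutation_lower=vowels_permutation.lower()
--     vowels_permutation_upper=vowels_permutation.upper()
--     transpose_dict={}
--     for i in CONSONANTS_LOWER:#小写辅音
--         transpose_dict[i]=i
--     for i in CONSONANTS_UPPER:#大写辅音
--         transpose_dict[i]=i
--     for i in VOWELS_LOWER:#小写元音
--         transpose_dict[i]=vowels_permutation_lower[num_1]
--         num_1=num_1+1
--     for i in VOWELS_UPPER:#大写元音
--         transpose_dict[i]=vowels_permutation_upper[num_2]
--         num_2=num_2+1
--     return transpose_dict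
-- ===== SOURCE B (Python) =====
-- VOWELS_LOWER = 'aeiou'
--
-- VOWELS_UPPER = 'AEIOU'
--
-- CONSONANTS_LOWER = 'bcdfghjklmnpqrstvwxyz'
--
-- CONSONANTS_UPPER = 'BCDFGHJKLMNPQRSTVWXYZ'
--
-- def build_transpose_dict(vowels_permutation):
--     lo = vowels_permutation.lower()
--     up = vowels_permutation.upper()
--     def image(c):
--         i = VOWELS_LOWER.find(c.lower())
--         if i < 0:
--             return c
--         return up[i] if c.isupper() else lo[i]
--     order = CONSONANTS_LOWER + CONSONANTS_UPPER + VOWELS_LOWER + VOWELS_UPPER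
--     return {c: image(c) for c in order}
-- ===== Notes on version B (the rewrite author's own statement) =====
-- stated objective: alternative
-- what changed: Replaces A's four segmented assignment loops with manual integer counters by a single pass over all 52 letters that computes each letter's image via a vowel-index lookup (str.find on VOWELS_LOWER of the lowercased letter, then indexing the permutation by that index).
import Mathlib
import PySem

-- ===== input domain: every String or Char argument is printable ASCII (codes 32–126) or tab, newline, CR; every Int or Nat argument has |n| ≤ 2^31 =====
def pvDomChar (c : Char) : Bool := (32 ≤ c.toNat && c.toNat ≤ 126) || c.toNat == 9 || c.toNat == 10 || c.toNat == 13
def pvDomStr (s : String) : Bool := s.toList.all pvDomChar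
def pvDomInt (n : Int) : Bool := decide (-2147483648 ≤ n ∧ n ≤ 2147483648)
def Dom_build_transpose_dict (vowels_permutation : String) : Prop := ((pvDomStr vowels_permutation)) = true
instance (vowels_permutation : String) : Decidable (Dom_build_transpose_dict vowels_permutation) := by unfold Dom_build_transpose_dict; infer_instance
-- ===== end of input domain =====

-- B replaces A's four counter-driven assignment loops by a single pass over the 52 letters that
-- computes each letter's image with a vowel-index lookup (str.find) — objective: alternative decomposition, same cost.

def VOWELS_LOWER : String := "aeiou"
def VOWELS_UPPER : String := "AEIOU"
def CONSONANTS_LOWER : String := "bcdfghjklmnpqrstvwxyz"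
def CONSONANTS_UPPER : String := "BCDFGHJKLMNPQRSTVWXYZ"

-- ===== PORT A =====
def build_transpose_dict (vowels_permutation : String) : List (String × String) :=
  let vowels_permutation_lower := PySem.Str.lower vowels_permutation
  let vowels_permutation_upper := PySem.Str.upper vowels_permutation
  let transpose_dict : PySem.Dict String String := PySem.Dict.empty
  let transpose_dict := CONSONANTS_LOWER.toList.foldl
    (fun d i => d.insert (String.ofList [i]) (String.ofList [i])) transpose_dict
  let transpose_dict := CONSONANTS_UPPER.toList.foldl
    (fun d i => d.insert (String.ofList [i]) (String.ofList [i])) transpose_dict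
  -- num_1 counter loop; pyGet? none = IndexError (excluded by Pre_), "" placeholder there
  let st := VOWELS_LOWER.toList.foldl
    (fun (p : PySem.Dict String String × Int) i =>
      (p.1.insert (String.ofList [i])
        (match PySem.Str.pyGet? vowels_permutation_lower p.2 with
         | some ch => String.ofList [ch]
         | none => ""), p.2 + 1)) (transpose_dict, 0)
  let st := VOWELS_UPPER.toList.foldl
    (fun (p : PySem.Dict String String × Int) i =>
      (p.1.insert (String.ofList [i])
        (match PySem.Str.pyGet? vowels_permutation_upper p.2 with
         | some ch => String.ofList [ch]
         | none => ""), p.2 + 1)) (st.1, 0)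
  st.1.items

-- ===== PORT B =====
-- image(c): index of c.lower() in VOWELS_LOWER via find; -1 → identity, else the vowel's
-- replacement from up/lo depending on case; pyGet? none = IndexError (excluded by Pre_), "" placeholder
def pvImage (lo up : String) (c : Char) : String :=
  let i := PySem.Str.find VOWELS_LOWER (String.ofList [PySem.Chars.lowerChar c])
  if i < 0 then String.ofList [c]
  else if PySem.Chars.isupper c then
    match PySem.Str.pyGet? up i with
    | some ch => String.ofList [ch]
    | none => ""
  else
    match PySem.Str.pyGet? lo i with
    | some ch => String.ofList [ch]
    | none => ""

def build_transpose_dict_alt (vowels_permutation : String) : List (String × String) :=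
  let lo := PySem.Str.lower vowels_permutation
  let up := PySem.Str.upper vowels_permutation
  let order := CONSONANTS_LOWER.toList ++ CONSONANTS_UPPER.toList
               ++ VOWELS_LOWER.toList ++ VOWELS_UPPER.toList
  (order.foldl
    (fun d c => d.insert (String.ofList [c]) (pvImage lo up c))
    (PySem.Dict.empty : PySem.Dict String String)).items

-- ===== PRECONDITION & SPEC =====
-- Pre_ excludes permutation strings shorter than 5 characters, on which A raises IndexError.
def Pre_build_transpose_dict (vowels_permutation : String) : Prop :=
  5 ≤ vowels_permutation.toList.length
instance (vowels_permutation : String) : Decidable (Pre_build_transpose_dict vowels_permutation) := by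
  unfold Pre_build_transpose_dict; infer_instance

def pvWitness_build_transpose_dict : String := "eaiuo"

def Spec_build_transpose_dict (vowels_permutation : String) (out : List (String × String)) : Prop := out = build_transpose_dict_alt vowels_permutation
instance (vowels_permutation : String) (out : List (String × String)) : Decidable (Spec_build_transpose_dict vowels_permutation out) := by unfold Spec_build_transpose_dict; infer_instance

-- ===== CLAIM (what is proved, stated in full; the proofs are below) =====
def Claim_equal_build_transpose_dict : Prop := ∀ (vowels_permutation : String), Dom_build_transpose_dict vowels_permutation → Pre_build_transpose_dict vowels_permutation → Spec_build_transpose_dict vowels_permutation (build_transpose_dict vowels_permutation)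

-- ===== LEMMAS AND PROOFS =====

-- both ports reduce to the same chain of 52 inserts: B's find-based image of each literal letter
-- is exactly the value A's segmented counter loops assign to it
theorem key_lemma (s : String) :
    build_transpose_dict s = build_transpose_dict_alt s := by
  have hvl : VOWELS_LOWER.toList = ['a','e','i','o','u'] := by decide
  have hvu : VOWELS_UPPER.toList = ['A','E','I','O','U'] := by decide
  have hcl : CONSONANTS_LOWER.toList = ['b','c','d','f','g','h','j','k','l','m','n','p','q','r','s','t','v','w','x','y','z'] := by decide
  have hcu : CONSONANTS_UPPER.toList = ['B','C','D','F','G','H','J','K','L','M','N','P','Q','R','S','T','V','W','X','Y','Z'] := by decide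
  simp only [build_transpose_dict, build_transpose_dict_alt, hvl, hvu, hcl, hcu]
  norm_num [pvImage, VOWELS_LOWER, List.foldl_cons, List.foldl_nil, List.foldl_append,
    PySem.Str.pyGet?_eq, PySem.Chars.find, PySem.Chars.isupper, PySem.Chars.lowerChar]
  rfl

-- ===== VERDICT (by name: the statement is the Claim_ definition above) =====
theorem build_transpose_dict_spec : Claim_equal_build_transpose_dict := by
  intro vp _ _
  exact key_lemma vp
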